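-- pv_equiv track=rewrite | github.com/cloudbook-project/agent | agent.py | ip_str2int
-- ===== SOURCE A (Python) =====
-- def ip_str2int(ip):
-- 	# ip = "A.B.C.D"
--
-- 	# ip_split = ["A", "B", "C", "D"]
-- 	ip_split = ip.split(".")
--
-- 	# ip_split_dec = [A, B, C, D]
-- 	ip_split_dec = [int(byte_i) for byte_i in ip_split]
--
-- 	# int_ip = A*2^24 + B*2^16 + C*2^8 + D
-- 	int_ip = 0
-- 	for byte_i in ip_split_dec:
-- 		int_ip *= 2**8 		# result = result x 2^8
-- 		int_ip += byte_i
--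
-- 	return int_ip
-- ===== SOURCE B (Python) =====
-- def ip_str2int(ip):
-- 	# Same task, different decomposition: independent positional weights summed
-- 	# in one pass instead of A's Horner multiply-accumulate loop.
-- 	parts = ip.split(".")
-- 	n = len(parts)
-- 	return sum(int(p) << (8 * (n - 1 - i)) for i, p in enumerate(parts))
-- ===== Notes on version B (the rewrite author's own statement) =====
-- stated objective: alternative
-- what changed: Replaced the Horner-style multiply-accumulate loop with a single positional sum: each dotted part is shifted left by 8*(n-1-i) and the shifted values are summed.
import Mathlib
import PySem

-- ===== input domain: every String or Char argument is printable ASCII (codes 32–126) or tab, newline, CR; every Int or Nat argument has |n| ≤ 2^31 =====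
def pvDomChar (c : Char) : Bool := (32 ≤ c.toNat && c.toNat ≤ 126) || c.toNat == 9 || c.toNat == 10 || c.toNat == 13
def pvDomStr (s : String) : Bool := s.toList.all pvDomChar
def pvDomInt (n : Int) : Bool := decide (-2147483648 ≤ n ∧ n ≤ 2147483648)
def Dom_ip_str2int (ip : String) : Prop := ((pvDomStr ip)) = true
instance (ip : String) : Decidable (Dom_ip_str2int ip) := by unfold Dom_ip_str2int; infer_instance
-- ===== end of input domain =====

-- B replaces A's Horner multiply-accumulate loop by a one-pass sum of independently
-- shifted octet values (alternative decomposition, same cost).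

-- ===== PORT A =====
-- ip.split(".") : sep "." ≠ "" so split? is always some
-- int(byte_i) : ofStr?; Pre_ guarantees some, getD 0 is never taken inside Pre_
def ip_str2int (ip : String) : Int :=
  let ip_split := (PySem.Str.split? ip ".").getD []
  let ip_split_dec := ip_split.map (fun p => (PySem.Int.ofStr? p).getD 0)
  ip_split_dec.foldl (fun int_ip b => int_ip * 2 ^ 8 + b) 0

-- ===== PORT B =====
def ip_str2int_alt (ip : String) : Int :=
  let parts := (PySem.Str.split? ip ".").getD []
  let n : Int := parts.length
  -- shift amount 8*(n-1-i) is ≥ 0 for every index i produced by enumerate; toNat is exact there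
  ((PySem.List.enumerate parts).map
    (fun q => ((PySem.Int.ofStr? q.2).getD 0) <<< (8 * (n - 1 - q.1)).toNat)).sum

-- ===== PRECONDITION & SPEC =====
-- Pre_ excludes exactly the inputs where some dotted part is not a valid int() literal,
-- on which Python A raises ValueError.
def Pre_ip_str2int (ip : String) : Prop :=
  ∀ p ∈ (PySem.Str.split? ip ".").getD [], (PySem.Int.ofStr? p).isSome = true
instance (ip : String) : Decidable (Pre_ip_str2int ip) := by unfold Pre_ip_str2int; infer_instance

def pvWitness_ip_str2int : String := "192.168.0.1"

def Spec_ip_str2int (ip : String) (out : Int) : Prop := out = ip_str2int_alt ip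
instance (ip : String) (out : Int) : Decidable (Spec_ip_str2int ip out) := by unfold Spec_ip_str2int; infer_instance

-- ===== CLAIM (what is proved, stated in full; the proofs are below) =====
def Claim_equal_ip_str2int : Prop := ∀ (ip : String), Dom_ip_str2int ip → Pre_ip_str2int ip → Spec_ip_str2int ip (ip_str2int ip)

-- ===== LEMMAS AND PROOFS =====

-- Horner fold over a list of ints equals the positional shifted sum (B's shape).
theorem horner_eq_shift_sum (xs : List Int) (acc : Int) (s n : Int)
    (h : n = s + xs.length) :
    xs.foldl (fun a b => a * 2 ^ 8 + b) acc
      = acc * (256 : Int) ^ xs.length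
        + ((PySem.List.enumerate xs s).map
            (fun q : Int × Int => q.2 <<< (8 * (n - 1 - q.1)).toNat)).sum := by
  induction xs generalizing acc s with
  | nil => simp
  | cons x t ih =>
    rw [List.foldl_cons, ih (acc * 2 ^ 8 + x) (s + 1) (by simp at h ⊢; omega),
        PySem.List.enumerate_cons]
    have hw : (8 * (n - 1 - s)).toNat = 8 * t.length := by
      simp at h; omega
    simp only [List.map_cons, List.sum_cons, hw]
    rw [Int.shiftLeft_eq, show ((2:Int) ^ (8 * t.length) = 256 ^ t.length) by rw [pow_mul]; norm_num]
    simp only [List.length_cons, pow_succ]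
    ring

theorem enumerate_map {α β : Type} (f : α → β) (xs : List α) (s : Int) (g : Int × β → Int) :
    ((PySem.List.enumerate (xs.map f) s).map g).sum
      = ((PySem.List.enumerate xs s).map (fun q => g (q.1, f q.2))).sum := by
  induction xs generalizing s with
  | nil => simp
  | cons x t ih => simp [PySem.List.enumerate_cons, ih]

-- ===== VERDICT (by name: the statement is the Claim_ definition above) =====
theorem ip_str2int_spec : Claim_equal_ip_str2int := by
  intro ip _ _
  unfold Spec_ip_str2int ip_str2int ip_str2int_alt
  rw [horner_eq_shift_sum _ 0 0 ((((PySem.Str.split? ip ".").getD []).length : Int)) (by simp)]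
  rw [enumerate_map]
  simp
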